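-- pv_equiv track=rewrite | github.com/QuantumQualia/thejam | jamjam.py | consecutive_mismatches
-- ===== SOURCE A (Python) =====
-- def consecutive_mismatches(str1, str2, threshold=3):
--     current_count = 0
--     max_count = 1  # Initialize to 1 to handle the case of no consecutive mismatches
--     total_count_threshold = 0  # Initialize count of consecutive mismatches with threshold
--     for char1, char2 in zip(str1, str2):
--         if char1 != char2:
--             current_count += 1
--             max_count = max(max_count, current_count)
--             if current_count >= threshold:
--                 total_count_threshold += 1
--         else:
--             current_count = 0  # Reset the count if consecutive characters match
--     return max_count, current_count, total_count_threshold
-- ===== SOURCE B (Python) =====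
-- def consecutive_mismatches(str1, str2, threshold=3):
--     # runs-then-aggregate decomposition: first compute the run-length encoding of
--     # the mismatch flags, then derive all three results from the run list.
--     flags = [c1 != c2 for c1, c2 in zip(str1, str2)]
--     runs = []
--     cur, cnt = None, 0
--     for f in flags:
--         if f == cur:
--             cnt += 1
--         else:
--             if cur is not None:
--                 runs.append((cur, cnt))
--             cur, cnt = f, 1
--     if cur is not None:
--         runs.append((cur, cnt))
--     mism = [n for v, n in runs if v]
--     max_count = max([1] + mism)
--     current_count = runs[-1][1] if runs and runs[-1][0] else 0
--     total = sum(min(n, max(0, n - threshold + 1)) for n in mism)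
--     return max_count, current_count, total
-- ===== Notes on version B (the rewrite author's own statement) =====
-- stated objective: alternative
-- what changed: Replaces A's incremental streak counters with a runs-then-aggregate decomposition: build the run-length encoding of the mismatch flags once, then read max_count as max(1, run lengths), current_count from the last run, and the threshold tally as a closed-form sum min(L, max(0, L-threshold+1)) over mismatch runs.
import Mathlib
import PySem

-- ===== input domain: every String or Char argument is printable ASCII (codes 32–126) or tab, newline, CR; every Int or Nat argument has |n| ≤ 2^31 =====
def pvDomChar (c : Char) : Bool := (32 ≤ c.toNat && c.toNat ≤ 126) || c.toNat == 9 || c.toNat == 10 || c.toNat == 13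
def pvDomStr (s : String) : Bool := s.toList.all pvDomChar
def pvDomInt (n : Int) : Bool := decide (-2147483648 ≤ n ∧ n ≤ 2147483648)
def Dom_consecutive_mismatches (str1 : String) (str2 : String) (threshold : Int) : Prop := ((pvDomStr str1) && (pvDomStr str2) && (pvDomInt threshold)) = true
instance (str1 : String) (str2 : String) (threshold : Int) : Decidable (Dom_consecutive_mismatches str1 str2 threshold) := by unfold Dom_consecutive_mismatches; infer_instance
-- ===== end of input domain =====

-- B replaces A's streaming streak counters by a runs-then-aggregate decomposition (same O(n) cost).

-- ===== PORT A =====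
-- loop body; state is (current_count, max_count, total_count_threshold), in Python declaration order
def pvStepA (threshold : Int) (st : Int × Int × Int) (pc : Char × Char) : Int × Int × Int :=
  if pc.1 ≠ pc.2 then
    let c := st.1 + 1
    (c, max st.2.1 c, if c ≥ threshold then st.2.2 + 1 else st.2.2)
  else
    (0, st.2.1, st.2.2)

def consecutive_mismatches (str1 : String) (str2 : String) (threshold : Int) : Int × Int × Int :=
  let st := (List.zip str1.toList str2.toList).foldl (pvStepA threshold) (0, 1, 0)
  (st.2.1, st.1, st.2.2)

-- ===== PORT B =====
-- run-length encoding of the flag list (the hand-written groupby loop of Source B)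
def pvRunsAux (cur : Bool) (cnt : Int) : List Bool → List (Bool × Int)
  | [] => [(cur, cnt)]
  | f :: rest => if f = cur then pvRunsAux cur (cnt + 1) rest
                 else (cur, cnt) :: pvRunsAux f 1 rest

def pvRuns : List Bool → List (Bool × Int)
  | [] => []
  | f :: rest => pvRunsAux f 1 rest

def consecutive_mismatches_alt (str1 : String) (str2 : String) (threshold : Int) : Int × Int × Int :=
  let flags := List.zipWith (fun a b => a != b) str1.toList str2.toList
  let rs := pvRuns flags
  let mism := (rs.filter (fun p => p.1)).map (fun p => p.2)
  let maxc := mism.foldl (fun a b => max a b) 1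
  let cur := match rs.getLast? with
             | some (true, n) => n
             | _ => 0
  let tot := (mism.map (fun n => min n (max 0 (n - threshold + 1)))).sum
  (maxc, cur, tot)

-- ===== PRECONDITION & SPEC =====
def Spec_consecutive_mismatches (str1 : String) (str2 : String) (threshold : Int) (out : Int × Int × Int) : Prop := out = consecutive_mismatches_alt str1 str2 threshold
instance (str1 : String) (str2 : String) (threshold : Int) (out : Int × Int × Int) : Decidable (Spec_consecutive_mismatches str1 str2 threshold out) := by unfold Spec_consecutive_mismatches; infer_instance

-- ===== CLAIM (what is proved, stated in full; the proofs are below) =====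
def Claim_equal_consecutive_mismatches : Prop := ∀ (str1 : String) (str2 : String) (threshold : Int), Dom_consecutive_mismatches str1 str2 threshold → Spec_consecutive_mismatches str1 str2 threshold (consecutive_mismatches str1 str2 threshold)

-- ===== LEMMAS AND PROOFS =====

-- B-side aggregates as named functions (definitionally what _alt computes from rs)
def pvMism (rs : List (Bool × Int)) : List Int := (rs.filter (fun p => p.1)).map (fun p => p.2)
def pvAggM (m : Int) (rs : List (Bool × Int)) : Int := (pvMism rs).foldl (fun a b => max a b) m
def pvAggC (rs : List (Bool × Int)) : Int :=
  match rs.getLast? with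
  | some (true, n) => n
  | _ => 0
def pvF (th n : Int) : Int := min n (max 0 (n - th + 1))
def pvAggT (th : Int) (rs : List (Bool × Int)) : Int := ((pvMism rs).map (pvF th)).sum

-- step on a boolean flag (what pvStepA does, abstracted from the characters)
def pvStepF (threshold : Int) (st : Int × Int × Int) (f : Bool) : Int × Int × Int :=
  if f then
    let c := st.1 + 1
    (c, max st.2.1 c, if c ≥ threshold then st.2.2 + 1 else st.2.2)
  else
    (0, st.2.1, st.2.2)

lemma pvFoldA_eq_foldF (threshold : Int) :
    ∀ (xs ys : List Char) (st : Int × Int × Int),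
      (List.zip xs ys).foldl (pvStepA threshold) st
        = (List.zipWith (fun a b => a != b) xs ys).foldl (pvStepF threshold) st := by
  intro xs
  induction xs with
  | nil => intro ys st; cases ys <;> rfl
  | cons x xs ih =>
      intro ys st
      cases ys with
      | nil => rfl
      | cons y ys =>
          simp only [List.zip_cons_cons, List.zipWith_cons_cons, List.foldl_cons]
          rw [ih]
          congr 1
          simp [pvStepA, pvStepF, bne_iff_ne]

lemma pvMism_cons_true (k : Int) (rs : List (Bool × Int)) :
    pvMism ((true, k) :: rs) = k :: pvMism rs := by simp [pvMism]

lemma pvMism_cons_false (k : Int) (rs : List (Bool × Int)) :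
    pvMism ((false, k) :: rs) = pvMism rs := by simp [pvMism]

lemma pvF_succ (th n : Int) (hn : 0 ≤ n) :
    pvF th (n + 1) = pvF th n + (if n + 1 ≥ th then 1 else 0) := by
  unfold pvF; split <;> omega

lemma pvF_one (th : Int) : pvF th 1 = if (1 : Int) ≥ th then 1 else 0 := by
  unfold pvF; split <;> omega

lemma pvRunsAux_head : ∀ (l : List Bool) (cur : Bool) (n : Int),
    ∃ k tl, pvRunsAux cur n l = (cur, k) :: tl ∧ n ≤ k := by
  intro l
  induction l with
  | nil => intro cur n; exact ⟨n, [], rfl, le_refl n⟩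
  | cons f rest ih =>
      intro cur n
      by_cases h : f = cur
      · obtain ⟨k, tl, heq, hk⟩ := ih cur (n + 1)
        subst h
        exact ⟨k, tl, by simpa [pvRunsAux] using heq, by omega⟩
      · exact ⟨n, pvRunsAux f 1 rest, by simp [pvRunsAux, h], le_refl n⟩

lemma pvAggM_absorb (rest : List Bool) (n m : Int) :
    pvAggM (max m n) (pvRunsAux true n rest) = pvAggM m (pvRunsAux true n rest) := by
  obtain ⟨k, tl, heq, hk⟩ := pvRunsAux_head rest true n
  rw [heq]
  unfold pvAggM
  rw [pvMism_cons_true]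
  simp only [List.foldl_cons]
  congr 1
  omega

lemma pvAggC_cons (p : Bool × Int) (q : Bool × Int) (tl : List (Bool × Int)) :
    pvAggC (p :: q :: tl) = pvAggC (q :: tl) := by
  unfold pvAggC
  rw [List.getLast?_cons_cons]

-- key invariant: a mid-run fold state versus the runs-based aggregates
lemma pvKey (threshold : Int) :
    ∀ (ms : List Bool) (cur : Bool) (n m t : Int), 1 ≤ n → 1 ≤ m → (cur = true → n ≤ m) →
      ms.foldl (pvStepF threshold) (cond cur n 0, m, t)
        = (pvAggC (pvRunsAux cur n ms),
           pvAggM m (pvRunsAux cur n ms),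
           t - cond cur (pvF threshold n) 0 + pvAggT threshold (pvRunsAux cur n ms)) := by
  intro ms
  induction ms with
  | nil =>
      intro cur n m t hn hm hnm
      cases cur with
      | true =>
          have hnm' := hnm rfl
          show ((n : Int), m, t) = _
          simp only [pvRunsAux]
          refine Prod.ext ?_ (Prod.ext ?_ ?_)
          · simp [pvAggC]
          · show m = pvAggM m [(true, n)]
            unfold pvAggM
            rw [pvMism_cons_true]
            show m = max m n
            omega
          · show t = t - cond true (pvF threshold n) 0 + pvAggT threshold [(true, n)]
            unfold pvAggT
            rw [pvMism_cons_true]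
            simp only [Bool.cond_true, pvMism, List.filter_nil, List.map_nil, List.map_cons,
              List.sum_cons, List.sum_nil]
            omega
      | false =>
          show ((0 : Int), m, t) = _
          simp only [pvRunsAux]
          refine Prod.ext ?_ (Prod.ext ?_ ?_)
          · simp [pvAggC]
          · show m = pvAggM m [(false, n)]
            unfold pvAggM
            rw [pvMism_cons_false]
            rfl
          · show t = t - cond false (pvF threshold n) 0 + pvAggT threshold [(false, n)]
            unfold pvAggT
            rw [pvMism_cons_false]
            simp [pvMism]
  | cons f rest ih =>
      intro cur n m t hn hm hnm
      simp only [List.foldl_cons]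
      by_cases hf : f = cur
      · subst hf
        cases f with
        | true =>
            have hnm' := hnm rfl
            have hstep : pvStepF threshold (cond true n 0, m, t) true
                = (cond true (n + 1) 0, max m (n + 1),
                   if n + 1 ≥ threshold then t + 1 else t) := by
              simp [pvStepF]
            rw [hstep,
              ih true (n + 1) (max m (n + 1)) (if n + 1 ≥ threshold then t + 1 else t)
                (by omega) (by omega) (fun _ => by omega)]
            have hruns : pvRunsAux true n (true :: rest) = pvRunsAux true (n + 1) rest := by
              simp [pvRunsAux]
            rw [hruns]
            refine Prod.ext rfl (Prod.ext ?_ ?_)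
            · exact pvAggM_absorb rest (n + 1) m
            · show (if n + 1 ≥ threshold then t + 1 else t) - cond true (pvF threshold (n + 1)) 0
                  + pvAggT threshold (pvRunsAux true (n + 1) rest)
                = t - cond true (pvF threshold n) 0 + pvAggT threshold (pvRunsAux true (n + 1) rest)
              simp only [Bool.cond_true]
              rw [pvF_succ threshold n (by omega)]
              split_ifs <;> omega
        | false =>
            have hstep : pvStepF threshold (cond false n 0, m, t) false
                = (cond false (n + 1) 0, m, t) := by
              simp [pvStepF]
            rw [hstep, ih false (n + 1) m t (by omega) hm (fun h => absurd h (by simp))]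
            have hruns : pvRunsAux false n (false :: rest) = pvRunsAux false (n + 1) rest := by
              simp [pvRunsAux]
            rw [hruns]
            simp only [Bool.cond_false]
      · cases cur with
        | true =>
            have hfv : f = false := by revert hf; cases f <;> simp
            subst hfv
            have hnm' := hnm rfl
            have hstep : pvStepF threshold (cond true n 0, m, t) false
                = (cond false 1 0, m, t) := by
              simp [pvStepF]
            rw [hstep, ih false 1 m t le_rfl hm (fun h => absurd h (by simp))]
            have hruns : pvRunsAux true n (false :: rest)
                = (true, n) :: pvRunsAux false 1 rest := by
              simp [pvRunsAux]
            rw [hruns]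
            obtain ⟨k, tl, heq, hk⟩ := pvRunsAux_head rest false 1
            rw [heq]
            refine Prod.ext ?_ (Prod.ext ?_ ?_)
            · exact (pvAggC_cons _ _ _).symm
            · show pvAggM m ((false, k) :: tl) = pvAggM m ((true, n) :: (false, k) :: tl)
              unfold pvAggM
              rw [pvMism_cons_true, pvMism_cons_false]
              simp only [List.foldl_cons]
              have : max m n = m := by omega
              rw [this]
            · show t - cond false (pvF threshold 1) 0 + pvAggT threshold ((false, k) :: tl)
                = t - cond true (pvF threshold n) 0 + pvAggT threshold ((true, n) :: (false, k) :: tl)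
              unfold pvAggT
              rw [pvMism_cons_true, pvMism_cons_false]
              simp only [Bool.cond_true, Bool.cond_false, List.map_cons, List.sum_cons]
              omega
        | false =>
            have hfv : f = true := by revert hf; cases f <;> simp
            subst hfv
            have hstep : pvStepF threshold (cond false n 0, m, t) true
                = (cond true 1 0, max m 1, if (1 : Int) ≥ threshold then t + 1 else t) := by
              simp [pvStepF]
            have hmax : max m 1 = m := by omega
            rw [hstep, hmax,
              ih true 1 m (if (1 : Int) ≥ threshold then t + 1 else t) le_rfl hm (fun _ => hm)]
            have hruns : pvRunsAux false n (true :: rest)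
                = (false, n) :: pvRunsAux true 1 rest := by
              simp [pvRunsAux]
            rw [hruns]
            obtain ⟨k, tl, heq, hk⟩ := pvRunsAux_head rest true 1
            rw [heq]
            refine Prod.ext ?_ (Prod.ext ?_ ?_)
            · exact (pvAggC_cons _ _ _).symm
            · show pvAggM m ((true, k) :: tl) = pvAggM m ((false, n) :: (true, k) :: tl)
              unfold pvAggM
              rw [pvMism_cons_false]
            · show (if (1 : Int) ≥ threshold then t + 1 else t) - cond true (pvF threshold 1) 0
                  + pvAggT threshold ((true, k) :: tl)
                = t - cond false (pvF threshold n) 0 + pvAggT threshold ((false, n) :: (true, k) :: tl)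
              unfold pvAggT
              rw [pvMism_cons_false]
              simp only [Bool.cond_true, Bool.cond_false]
              rw [pvF_one]
              split_ifs <;> omega

theorem consecutive_mismatches_spec : Claim_equal_consecutive_mismatches := by
  intro str1 str2 threshold _
  unfold Spec_consecutive_mismatches
  show consecutive_mismatches str1 str2 threshold = consecutive_mismatches_alt str1 str2 threshold
  unfold consecutive_mismatches consecutive_mismatches_alt
  rw [pvFoldA_eq_foldF]
  generalize List.zipWith (fun a b => a != b) str1.toList str2.toList = ms
  cases ms with
  | nil => rfl
  | cons f rest =>
      simp only [List.foldl_cons, pvRuns]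
      cases f with
      | true =>
          have hstep : pvStepF threshold ((0 : Int), 1, 0) true
              = (cond true 1 0, (1 : Int), (0 : Int) + pvF threshold 1) := by
            simp [pvStepF, pvF_one]
          rw [hstep, pvKey threshold rest true 1 1 (0 + pvF threshold 1) le_rfl le_rfl
            (fun _ => le_rfl)]
          refine Prod.ext ?_ (Prod.ext ?_ ?_)
          · rfl
          · rfl
          · show (0 : Int) + pvF threshold 1 - cond true (pvF threshold 1) 0
                + pvAggT threshold (pvRunsAux true 1 rest) = _
            simp only [Bool.cond_true, pvAggT, pvMism]
            have hfn : (fun n => min n (max 0 (n - threshold + 1))) = pvF threshold := rfl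
            rw [hfn]
            omega
      | false =>
          have hstep : pvStepF threshold ((0 : Int), 1, 0) false
              = (cond false 1 0, (1 : Int), (0 : Int)) := by
            simp [pvStepF]
          rw [hstep, pvKey threshold rest false 1 1 0 le_rfl le_rfl
            (fun h => absurd h (by simp))]
          refine Prod.ext ?_ (Prod.ext ?_ ?_)
          · rfl
          · rfl
          · show (0 : Int) - cond false (pvF threshold 1) 0
                + pvAggT threshold (pvRunsAux false 1 rest) = _
            simp only [Bool.cond_false, pvAggT, pvMism]
            have hfn : (fun n => min n (max 0 (n - threshold + 1))) = pvF threshold := rfl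
            rw [hfn]
            omega
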